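-- pv_equiv track=rewrite | github.com/harqian/mtfc-equitable_busses | model.py | _select_vehicle_type_label
-- ===== SOURCE A (Python) =====
-- import math
--
-- def _normalize_vehicle_type_label(raw: object) -> tuple[str, str]:
--     text = str(raw).strip()
--     normalized = text.upper().replace("-", " ")
--     normalized = " ".join(normalized.split())
--     label_map = {
--         "M STD": "motor_standard",
--         "M ARTIC": "motor_articulated",
--         "T STD": "trolley_standard",
--         "T ARTIC": "trolley_articulated",
--     }
--     category = label_map.get(normalized, "unknown")
--     return category, text
--
-- def _select_vehicle_type_label(raw: object) -> tuple[str, str]: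
--     if raw is None or (isinstance(raw, float) and math.isnan(raw)):
--         return "unknown", "Unknown"
--
--     parts = [part.strip() for part in str(raw).split(",") if part.strip()]
--     if not parts:
--         return "unknown", "Unknown"
--
--     ranked_parts: list[tuple[int, str, str]] = []
--     rank_map = {
--         "motor_articulated": 4,
--         "motor_standard": 3,
--         "trolley_articulated": 2,
--         "trolley_standard": 1,
--         "unknown": 0,
--     }
--     for part in parts:
--         category, label = _normalize_vehicle_type_label(part)
--         ranked_parts.append((rank_map.get(category, 0), category, label))
--
--     ranked_parts.sort(key=lambda item: (-item[0], item[2]))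
--     _, category, label = ranked_parts[0]
--     return category, label
-- ===== SOURCE B (Python) =====
-- import math
--
-- _RANK_MAP = {
--     "motor_articulated": 4,
--     "motor_standard": 3,
--     "trolley_articulated": 2,
--     "trolley_standard": 1,
--     "unknown": 0,
-- }
--
-- def _normalize_vehicle_type_label(raw: object) -> tuple[str, str]:
--     text = str(raw).strip()
--     normalized = text.upper().replace("-", " ")
--     normalized = " ".join(normalized.split())
--     label_map = {
--         "M STD": "motor_standard",
--         "M ARTIC": "motor_articulated",
--         "T STD": "trolley_standard",
--         "T ARTIC": "trolley_articulated",
--     }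
--     category = label_map.get(normalized, "unknown")
--     return category, text
--
-- def _select_vehicle_type_label(raw: object) -> tuple[str, str]:
--     if raw is None or (isinstance(raw, float) and math.isnan(raw)):
--         return "unknown", "Unknown"
--
--     best = None  # (rank, category, label) of the best part seen so far
--     for piece in str(raw).split(","):
--         part = piece.strip()
--         if not part:
--             continue
--         category, label = _normalize_vehicle_type_label(part)
--         rank = _RANK_MAP.get(category, 0)
--         if best is None or rank > best[0] or (rank == best[0] and label < best[2]):
--             best = (rank, category, label)
--
--     if best is None:
--         return "unknown", "Unknown"
--     return best[1], best[2]
-- ===== Notes on version B (the rewrite author's own statement) =====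
-- stated objective: simpler
-- what changed: Replaces building a full ranked list and sorting it by (-rank, label) with a single pass over the split pieces that tracks the best (rank, category, label) directly, with strict-improvement replacement reproducing the stable sort's first-minimum tie-break; no intermediate list and no sort.
import Mathlib
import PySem

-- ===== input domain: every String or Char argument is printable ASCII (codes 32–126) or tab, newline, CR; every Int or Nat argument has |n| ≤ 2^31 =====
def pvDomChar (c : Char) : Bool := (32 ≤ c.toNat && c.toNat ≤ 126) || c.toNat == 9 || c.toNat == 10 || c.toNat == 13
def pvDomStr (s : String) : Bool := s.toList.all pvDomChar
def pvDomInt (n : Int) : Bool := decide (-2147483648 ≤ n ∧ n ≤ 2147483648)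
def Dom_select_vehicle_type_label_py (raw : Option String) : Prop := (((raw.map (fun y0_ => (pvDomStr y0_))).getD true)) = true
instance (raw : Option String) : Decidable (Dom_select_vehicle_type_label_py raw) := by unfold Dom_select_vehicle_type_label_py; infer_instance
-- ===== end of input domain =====

-- B replaces sort-then-take-first by a single-pass best-so-far selection (simpler; no intermediate ranked list, no sort).

-- ===== PORT A =====
-- shared module helper _normalize_vehicle_type_label (used by both A and B, like in the Python module)
def pvNormalizeVehicleTypeLabel (raw : String) : String × String :=
  let text := PySem.Str.strip raw
  let normalized := PySem.Str.replace (PySem.Str.upper text) "-" " "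
  let normalized2 := PySem.Str.join " " (PySem.Str.split₀ normalized)
  let label_map : PySem.Dict String String :=
    ((((PySem.Dict.empty).insert "M STD" "motor_standard").insert "M ARTIC" "motor_articulated").insert
        "T STD" "trolley_standard").insert "T ARTIC" "trolley_articulated"
  (label_map.getD normalized2 "unknown", text)

-- rank_map (identical literal in A's body and as B's module constant _RANK_MAP)
def pvRankMap : PySem.Dict String Int :=
  (((((PySem.Dict.empty).insert "motor_articulated" 4).insert "motor_standard" 3).insert
      "trolley_articulated" 2).insert "trolley_standard" 1).insert "unknown" 0

def select_vehicle_type_label_py (raw : Option String) : String × String :=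
  match raw with
  | none => ("unknown", "Unknown")   -- raw is None (the float-NaN test is unreachable for str input)
  | some s =>
    let parts := (((PySem.Str.split? s ",").getD []).filter (fun p => PySem.Str.strip p != "")).map PySem.Str.strip
    if parts = [] then ("unknown", "Unknown")
    else
      let ranked_parts : List (Int × String × String) :=
        parts.foldl (fun acc part =>
          let cl := pvNormalizeVehicleTypeLabel part
          acc ++ [(pvRankMap.getD cl.1 0, cl.1, cl.2)]) []
      match PySem.List.sorted2 ranked_parts (fun i => -i.1) (fun i => i.2.2) with
      | [] => ("unknown", "Unknown")   -- unreachable: ranked_parts is nonempty here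
      | (_, c, l) :: _ => (c, l)

-- ===== PORT B =====
-- the body of B's for-loop (strip, skip empties, rank, keep the better of best and the new item)
def pvSelectStep (best : Option (Int × String × String)) (piece : String) : Option (Int × String × String) :=
  let part := PySem.Str.strip piece
  if part != "" then
    let cl := pvNormalizeVehicleTypeLabel part
    let rank := pvRankMap.getD cl.1 0
    match best with
    | none => some (rank, cl.1, cl.2)
    | some b => if rank > b.1 ∨ (rank = b.1 ∧ cl.2 < b.2.2) then some (rank, cl.1, cl.2) else some b
  else best

def select_vehicle_type_label_py_alt (raw : Option String) : String × String :=
  match raw with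
  | none => ("unknown", "Unknown")
  | some s =>
    let best := ((PySem.Str.split? s ",").getD []).foldl pvSelectStep none
    match best with
    | none => ("unknown", "Unknown")
    | some b => (b.2.1, b.2.2)

-- ===== PRECONDITION & SPEC =====
def Spec_select_vehicle_type_label_py (raw : Option String) (out : String × String) : Prop := out = select_vehicle_type_label_py_alt raw
instance (raw : Option String) (out : String × String) : Decidable (Spec_select_vehicle_type_label_py raw out) := by unfold Spec_select_vehicle_type_label_py; infer_instance

-- ===== CLAIM (what is proved, stated in full; the proofs are below) =====
def Claim_equal_select_vehicle_type_label_py : Prop := ∀ (raw : Option String), Dom_select_vehicle_type_label_py raw → Spec_select_vehicle_type_label_py raw (select_vehicle_type_label_py raw)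

-- ===== LEMMAS AND PROOFS =====

-- proof-only abbreviation for the ranked item both loops build from a stripped part
def pvItem (part : String) : Int × String × String :=
  (pvRankMap.getD (pvNormalizeVehicleTypeLabel part).1 0,
   (pvNormalizeVehicleTypeLabel part).1, (pvNormalizeVehicleTypeLabel part).2)

-- the comparison sorted2 uses for the key (-rank, label)
def pvBefore (a b : Int × String × String) : Bool :=
  decide ((-a.1) < (-b.1)) || (!decide ((-b.1) < (-a.1)) && decide (a.2.2 < b.2.2))

-- the best-so-far selection step on already-ranked items
def pvOpt (b : Option (Int × String × String)) (x : Int × String × String) : Option (Int × String × String) :=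
  match b with
  | none => some x
  | some y => if x.1 > y.1 ∨ (x.1 = y.1 ∧ x.2.2 < y.2.2) then some x else some y

lemma pv_before_iff (a b : Int × String × String) :
    pvBefore a b = decide (a.1 > b.1 ∨ (a.1 = b.1 ∧ a.2.2 < b.2.2)) := by
  unfold pvBefore
  rcases lt_trichotomy a.1 b.1 with h | h | h <;> simp [h] <;> omega

lemma pv_sorted2_eq (xs : List (Int × String × String)) :
    PySem.List.sorted2 xs (fun i => -i.1) (fun i => i.2.2)
      = xs.foldl (fun acc x => PySem.List.insertBy pvBefore x acc) [] := rfl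

-- head of the insertion-sort fold equals the best-so-far fold pvOpt
lemma pv_head?_foldl_insertBy :
    ∀ (xs acc : List (Int × String × String)),
      (xs.foldl (fun a x => PySem.List.insertBy pvBefore x a) acc).head?
        = xs.foldl pvOpt acc.head? := by
  intro xs
  induction xs with
  | nil => intro acc; rfl
  | cons x xs ih =>
    intro acc
    rw [List.foldl_cons, List.foldl_cons, ih]
    congr 1
    cases acc with
    | nil => rfl
    | cons y ys =>
      show (if pvBefore x y then x :: y :: ys else y :: PySem.List.insertBy pvBefore x ys).head? = _
      rw [pv_before_iff]
      by_cases hc : x.1 > y.1 ∨ (x.1 = y.1 ∧ x.2.2 < y.2.2)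
      · rw [if_pos (decide_eq_true hc)]
        simp only [List.head?_cons, pvOpt]
        rw [if_pos hc]
      · rw [if_neg (by rw [decide_eq_true_eq]; exact hc)]
        simp only [List.head?_cons, pvOpt]
        rw [if_neg hc]

lemma pv_head?_sorted (xs : List (Int × String × String)) :
    (xs.foldl (fun acc x => PySem.List.insertBy pvBefore x acc) []).head?
      = xs.foldl pvOpt none :=
  pv_head?_foldl_insertBy xs []

-- B's pass over the raw pieces equals the best-so-far fold over the filtered, stripped, ranked items
lemma pv_foldB (pieces : List String) :
    ∀ (acc : Option (Int × String × String)),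
      pieces.foldl pvSelectStep acc
        = (((pieces.filter (fun p => PySem.Str.strip p != "")).map PySem.Str.strip).map pvItem).foldl
            pvOpt acc := by
  induction pieces with
  | nil => intro acc; rfl
  | cons p ps ih =>
    intro acc
    by_cases h : PySem.Str.strip p != ""
    · simp only [List.foldl_cons, List.filter_cons, h, if_true, List.map_cons]
      rw [ih]
      congr 1
      cases acc with
      | none =>
        simp only [pvSelectStep, pvOpt]
        rw [if_pos h,
            show pvItem (PySem.Str.strip p)
              = (pvRankMap.getD (pvNormalizeVehicleTypeLabel (PySem.Str.strip p)).1 0,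
                 (pvNormalizeVehicleTypeLabel (PySem.Str.strip p)).1,
                 (pvNormalizeVehicleTypeLabel (PySem.Str.strip p)).2) from rfl]
      | some y =>
        simp only [pvSelectStep, pvOpt]
        rw [if_pos h,
            show pvItem (PySem.Str.strip p)
              = (pvRankMap.getD (pvNormalizeVehicleTypeLabel (PySem.Str.strip p)).1 0,
                 (pvNormalizeVehicleTypeLabel (PySem.Str.strip p)).1,
                 (pvNormalizeVehicleTypeLabel (PySem.Str.strip p)).2) from rfl]
    · have h' : (PySem.Str.strip p != "") = false := by simpa using h
      simp only [List.foldl_cons, List.filter_cons, h', Bool.false_eq_true, if_false]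
      rw [ih]
      congr 1
      simp only [pvSelectStep]
      rw [if_neg (by simp [h'])]

-- ===== VERDICT (by name: the statement is the Claim_ definition above) =====
theorem select_vehicle_type_label_py_spec : Claim_equal_select_vehicle_type_label_py := by
  intro raw _
  unfold Spec_select_vehicle_type_label_py
  cases raw with
  | none => rfl
  | some s =>
    simp only [select_vehicle_type_label_py, select_vehicle_type_label_py_alt]
    rw [pv_foldB _ none,
        PySem.List.foldl_append_singleton_eq_map
          (fun part => (pvRankMap.getD (pvNormalizeVehicleTypeLabel part).1 0,
            (pvNormalizeVehicleTypeLabel part).1, (pvNormalizeVehicleTypeLabel part).2)),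
        List.nil_append,
        show List.map (fun part => (pvRankMap.getD (pvNormalizeVehicleTypeLabel part).1 0,
            (pvNormalizeVehicleTypeLabel part).1, (pvNormalizeVehicleTypeLabel part).2))
          = List.map pvItem from rfl,
        pv_sorted2_eq, ← pv_head?_sorted]
    set parts := (((PySem.Str.split? s ",").getD []).filter (fun p => PySem.Str.strip p != "")).map
      PySem.Str.strip with hp
    by_cases hpe : parts = []
    · simp [hpe]
    · rw [if_neg hpe]
      cases hs : (parts.map pvItem).foldl (fun acc x => PySem.List.insertBy pvBefore x acc) [] with
      | nil => rfl
      | cons x t =>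
        obtain ⟨r, c, l⟩ := x
        rfl
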